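-- pv_equiv track=rewrite | github.com/TheSingularityStudio/IDE-for-HPL | ide/server.py | clean_code
-- ===== SOURCE A (Python) =====
-- def clean_code(code):
--     """
--     清理代码中的转义字符
--     处理 PowerShell 等发送的转义换行符
--     注意：只在字符串外部处理转义，保留字符串内部的转义序列
--     """
--     result = []
--     i = 0
--     length = len(code)
--     in_string = False
--
--     while i < length:
--         char = code[i]
--
--         # 处理字符串边界
--         if char == '"':
--             # 检查是否是转义的引号
--             if i > 0 and code[i - 1] == '\\':
--                 # 字符串内的转义引号，保留原样
--                 result.append(char)
--                 i += 1
--             else: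
--                 # 字符串边界
--                 in_string = not in_string
--                 result.append(char)
--                 i += 1
--             continue
--
--         # 如果在字符串内部，保留所有字符原样（除了继续检查字符串边界）
--         if in_string:
--             result.append(char)
--             i += 1
--             continue
--
--         # 在字符串外部，处理转义字符
--         # 处理 PowerShell 风格的换行符转义
--         if char == '`' and i + 1 < length and code[i + 1] == 'n':
--             result.append('\n')
--             i += 2
--         # 处理 \n 转义
--         elif char == '\\' and i + 1 < length and code[i + 1] == 'n':
--             result.append('\n')
--             i += 2
--         # 处理 \t 转义
--         elif char == '\\' and i + 1 < length and code[i + 1] == 't':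
--             result.append('\t')
--             i += 2
--         # 处理 \" 转义 - 只在字符串外部时处理（创建字符串边界）
--         elif char == '\\' and i + 1 < length and code[i + 1] == '"':
--             # 保留转义引号，让 HPL 解析器正确处理
--             result.append(char)
--             result.append(code[i + 1])
--             i += 2
--         else:
--             result.append(char)
--             i += 1
--
--     return ''.join(result)
-- ===== SOURCE B (Python) =====
-- def _expand(s):
--     # escape expansion applied only to text outside string literals
--     return s.replace('`n', '\n').replace('\\n', '\n').replace('\\t', '\t')
--
--
-- def clean_code(code):
--     # Pass 1: cut the code into segments at every toggling quote (a '"' whose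
--     # immediately-preceding original character is not a backslash).
--     # Pass 2 (inlined): expand escapes in outside segments with batch replaces,
--     # copy inside segments verbatim; quotes are kept as their own pieces.
--     pieces = []
--     seg = []
--     inside = False
--     prev = None
--     for ch in code:
--         if ch == '"' and prev != '\\':
--             pieces.append(''.join(seg) if inside else _expand(''.join(seg)))
--             pieces.append('"')
--             seg = []
--             inside = not inside
--         else:
--             seg.append(ch)
--         prev = ch
--     pieces.append(''.join(seg) if inside else _expand(''.join(seg)))
--     return ''.join(pieces)
-- ===== Notes on version B (the rewrite author's own statement) =====
-- stated objective: alternative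
-- what changed: Replaced A's single interleaved index scan (with lookbehind/lookahead and per-character escape handling) by a two-pass segment approach: cut the code at unescaped quotes into outside/inside segments, expand escapes in outside segments with three batch str.replace calls, copy inside segments verbatim, and join.
import Mathlib
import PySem

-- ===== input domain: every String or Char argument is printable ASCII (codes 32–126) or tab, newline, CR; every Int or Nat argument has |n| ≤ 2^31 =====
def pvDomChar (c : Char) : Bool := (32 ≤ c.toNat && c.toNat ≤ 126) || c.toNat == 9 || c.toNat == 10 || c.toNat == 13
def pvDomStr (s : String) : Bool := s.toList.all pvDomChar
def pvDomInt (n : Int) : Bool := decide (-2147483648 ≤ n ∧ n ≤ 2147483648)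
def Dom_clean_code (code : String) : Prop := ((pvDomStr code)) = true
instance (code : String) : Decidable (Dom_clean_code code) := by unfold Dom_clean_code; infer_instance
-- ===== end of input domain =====

-- B replaces A's single interleaved index/lookahead scan by a segmentation pass (cut at
-- unescaped quotes) plus batch str.replace expansion of the outside segments (objective: alternative).

-- ===== PORT A =====
-- A's while loop over indices i with in_string state, lookbehind code[i-1], lookahead code[i+1].
def clean_code_loop (code : List Char) (i : Nat) (inString : Bool) (result : List Char) : List Char :=
  if _h : i < code.length then
    if code.getD i ' ' = '"' then
      if 0 < i ∧ code.getD (i - 1) ' ' = '\\' then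
        clean_code_loop code (i + 1) inString (result ++ [code.getD i ' '])
      else
        clean_code_loop code (i + 1) (!inString) (result ++ [code.getD i ' '])
    else if inString then
      clean_code_loop code (i + 1) inString (result ++ [code.getD i ' '])
    else if code.getD i ' ' = '`' ∧ i + 1 < code.length ∧ code.getD (i + 1) ' ' = 'n' then
      clean_code_loop code (i + 2) inString (result ++ ['\n'])
    else if code.getD i ' ' = '\\' ∧ i + 1 < code.length ∧ code.getD (i + 1) ' ' = 'n' then
      clean_code_loop code (i + 2) inString (result ++ ['\n'])
    else if code.getD i ' ' = '\\' ∧ i + 1 < code.length ∧ code.getD (i + 1) ' ' = 't' then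
      clean_code_loop code (i + 2) inString (result ++ ['\t'])
    else if code.getD i ' ' = '\\' ∧ i + 1 < code.length ∧ code.getD (i + 1) ' ' = '"' then
      clean_code_loop code (i + 2) inString (result ++ [code.getD i ' ', code.getD (i + 1) ' '])
    else
      clean_code_loop code (i + 1) inString (result ++ [code.getD i ' '])
  else result
termination_by code.length - i

def clean_code (code : String) : String :=
  String.ofList (clean_code_loop code.toList 0 false [])

-- ===== PORT B =====
-- _expand(s) = s.replace('`n','\n').replace('\\n','\n').replace('\\t','\t')
def pvExpand (s : List Char) : List Char :=
  PySem.Chars.replace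
    (PySem.Chars.replace (PySem.Chars.replace s ['`', 'n'] ['\n']) ['\\', 'n'] ['\n'])
    ['\\', 't'] ['\t']

-- the body of B's for loop: state = (pieces, seg, inside, prev)
def pvStepB (st : List (List Char) × List Char × Bool × Option Char) (ch : Char) :
    List (List Char) × List Char × Bool × Option Char :=
  match st with
  | (pieces, seg, inside, prev) =>
    if ch = '"' ∧ prev ≠ some '\\' then
      (pieces ++ [if inside then seg else pvExpand seg] ++ [['"']], [], !inside, some ch)
    else
      (pieces, seg ++ [ch], inside, some ch)

def clean_code_alt (code : String) : String :=
  match code.toList.foldl pvStepB ([], [], false, none) with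
  | (pieces, seg, inside, _) =>
    String.ofList (pieces ++ [if inside then seg else pvExpand seg]).flatten

-- ===== PRECONDITION & SPEC =====
def Spec_clean_code (code : String) (out : String) : Prop := out = clean_code_alt code
instance (code : String) (out : String) : Decidable (Spec_clean_code code out) := by unfold Spec_clean_code; infer_instance

-- ===== CLAIM (what is proved, stated in full; the proofs are below) =====
def Claim_equal_clean_code : Prop := ∀ (code : String), Dom_clean_code code → Spec_clean_code code (clean_code code)

-- ===== LEMMAS AND PROOFS =====

-- One-char-at-a-time reference form of A's scan: carries the previous original char.
def pvRef : Option Char → Bool → List Char → List Char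
  | _, _, [] => []
  | _, _, [c] => [c]
  | prev, inside, c :: c2 :: r =>
    if c = '"' then
      c :: pvRef (some c) (if prev = some '\\' then inside else !inside) (c2 :: r)
    else if inside then c :: pvRef (some c) inside (c2 :: r)
    else if (c = '`' ∨ c = '\\') ∧ c2 = 'n' then '\n' :: pvRef (some 'n') false r
    else if c = '\\' ∧ c2 = 't' then '\t' :: pvRef (some 't') false r
    else if c = '\\' ∧ c2 = '"' then c :: '"' :: pvRef (some '"') false r
    else c :: pvRef (some c) false (c2 :: r)

-- split at toggling quotes: (current segment, later segments); quotes are boundaries.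
def pvSegs : Option Char → List Char → List Char × List (List Char)
  | _, [] => ([], [])
  | prev, c :: r =>
    let p := pvSegs (some c) r
    if c = '"' ∧ prev ≠ some '\\' then ([], p.1 :: p.2)
    else (c :: p.1, p.2)

-- join segments back, applying proc to outside segments, '"' between segments
def pvIlv (proc : List Char → List Char) : Bool → List Char → List (List Char) → List Char
  | inside, h, [] => if inside then h else proc h
  | inside, h, h2 :: t => (if inside then h else proc h) ++ '"' :: pvIlv proc (!inside) h2 t

-- A's outside-of-strings escape scan, on one segment
def pvScan : List Char → List Char
  | [] => []
  | [c] => [c]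
  | c :: c2 :: r =>
    if (c = '`' ∨ c = '\\') ∧ c2 = 'n' then '\n' :: pvScan r
    else if c = '\\' ∧ c2 = 't' then '\t' :: pvScan r
    else if c = '\\' ∧ c2 = '"' then c :: '"' :: pvScan r
    else c :: pvScan (c2 :: r)

-- recursive characterisation of str.replace for a 2-char pattern and 1-char replacement
def pvRep (a b rc : Char) : List Char → List Char
  | [] => []
  | [c] => [c]
  | c1 :: c2 :: r => if c1 = a ∧ c2 = b then rc :: pvRep a b rc r else c1 :: pvRep a b rc (c2 :: r)

theorem pvRep_go (a b rc : Char) :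
    ∀ (fuel : Nat) (l acc : List Char), l.length ≤ fuel →
      PySem.Chars.replace.go [a, b] [rc] fuel l acc = acc.reverse ++ pvRep a b rc l := by
  intro fuel
  induction fuel with
  | zero =>
    intro l acc h
    have : l = [] := List.eq_nil_of_length_eq_zero (Nat.le_zero.mp h)
    subst this; simp [PySem.Chars.replace.go, pvRep]
  | succ n ih =>
    intro l acc h
    match l with
    | [] => simp [PySem.Chars.replace.go, pvRep]
    | [c] =>
      by_cases hp : List.isPrefixOf [a, b] [c] = true
      · simp [List.isPrefixOf] at hp
      · simp only [PySem.Chars.replace.go, hp]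
        rw [ih [] (c :: acc) (by simp)]
        simp [pvRep]
    | c1 :: c2 :: r =>
      by_cases hp : c1 = a ∧ c2 = b
      · obtain ⟨h1, h2⟩ := hp
        subst h1; subst h2
        have hpre : List.isPrefixOf [c1, c2] (c1 :: c2 :: r) = true := by
          simp [List.isPrefixOf]
        simp only [PySem.Chars.replace.go, hpre, if_true]
        rw [show List.drop [c1, c2].length (c1 :: c2 :: r) = r by simp]
        rw [ih r ([rc].reverse ++ acc) (by simp at h ⊢; omega)]
        simp [pvRep]
      · have hpre : ¬ List.isPrefixOf [a, b] (c1 :: c2 :: r) = true := by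
          simp [List.isPrefixOf]
          intro h1 h2; exact hp ⟨h1.symm, h2.symm⟩
        simp only [PySem.Chars.replace.go, hpre]
        rw [ih (c2 :: r) (c1 :: acc) (by simp at h ⊢; omega)]
        simp [pvRep, hp]

theorem pvRep_replace (a b rc : Char) (s : List Char) :
    PySem.Chars.replace s [a, b] [rc] = pvRep a b rc s := by
  have h : ([a, b] : List Char).isEmpty = false := by simp
  rw [PySem.Chars.replace]
  simp only [h]
  simpa using pvRep_go a b rc s.length s [] (le_refl _)

theorem pvRep_cons_ne (a b rc c : Char) (l : List Char) (h : ¬(c = a ∧ l.head? = some b)) :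
    pvRep a b rc (c :: l) = c :: pvRep a b rc l := by
  match l with
  | [] => simp [pvRep]
  | x :: r =>
    by_cases hc : c = a ∧ x = b
    · exact absurd ⟨hc.1, by simp [hc.2]⟩ h
    · simp [pvRep, hc]

theorem pvRep_head (a b rc : Char) (l : List Char) :
    (pvRep a b rc l).head? = some rc ∨ (pvRep a b rc l).head? = l.head? := by
  match l with
  | [] => right; rfl
  | [c] => right; simp [pvRep]
  | c1 :: c2 :: r =>
    by_cases h : c1 = a ∧ c2 = b
    · left; simp [pvRep, h]
    · right; simp [pvRep, h]

-- pvScan in one step, when the head cannot start a pattern against the tail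
theorem pvScan_cons_safe (c : Char) (l : List Char)
    (h1 : ¬((c = '`' ∨ c = '\\') ∧ l.head? = some 'n'))
    (h2 : ¬(c = '\\' ∧ l.head? = some 't'))
    (h3 : ¬(c = '\\' ∧ l.head? = some '"')) :
    pvScan (c :: l) = c :: pvScan l := by
  match l with
  | [] => simp [pvScan]
  | x :: r =>
    simp only [List.head?_cons, Option.some.injEq] at h1 h2 h3
    simp only [pvScan]
    rw [if_neg (by tauto), if_neg (by tauto), if_neg (by tauto)]

-- pvScan = the three sequential replaces (pvExpand)
theorem pvScan_eq_expand : ∀ s : List Char, pvExpand s = pvScan s := by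
  intro s
  unfold pvExpand
  rw [pvRep_replace, pvRep_replace, pvRep_replace]
  induction s using pvScan.induct with
  | case1 => simp [pvRep, pvScan]
  | case2 c => simp [pvRep, pvScan]
  | case3 c c2 r h ih =>
    obtain ⟨hc, hc2⟩ := h; subst hc2
    rcases hc with hc | hc
    · subst hc
      rw [show pvRep '`' 'n' '\n' ('`' :: 'n' :: r) = '\n' :: pvRep '`' 'n' '\n' r from by
        simp [pvRep]]
      rw [pvRep_cons_ne _ _ _ _ _ (by simp), pvRep_cons_ne _ _ _ _ _ (by simp)]
      rw [ih]; simp [pvScan]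
    · subst hc
      rw [pvRep_cons_ne '`' 'n' '\n' '\\' _ (by simp)]
      rw [pvRep_cons_ne '`' 'n' '\n' 'n' _ (by simp)]
      rw [show pvRep '\\' 'n' '\n' ('\\' :: 'n' :: pvRep '`' 'n' '\n' r)
            = '\n' :: pvRep '\\' 'n' '\n' (pvRep '`' 'n' '\n' r) from by simp [pvRep]]
      rw [pvRep_cons_ne '\\' 't' '\t' '\n' _ (by simp)]
      rw [ih]; simp [pvScan]
  | case4 c c2 r h1 h2 ih =>
    obtain ⟨hc, hc2⟩ := h2; subst hc; subst hc2
    rw [pvRep_cons_ne '`' 'n' '\n' '\\' _ (by simp)]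
    rw [pvRep_cons_ne '`' 'n' '\n' 't' _ (by simp)]
    rw [pvRep_cons_ne '\\' 'n' '\n' '\\' _ (by simp)]
    rw [pvRep_cons_ne '\\' 'n' '\n' 't' _ (by simp)]
    rw [show pvRep '\\' 't' '\t' ('\\' :: 't' :: pvRep '\\' 'n' '\n' (pvRep '`' 'n' '\n' r))
          = '\t' :: pvRep '\\' 't' '\t' (pvRep '\\' 'n' '\n' (pvRep '`' 'n' '\n' r)) from by
      simp [pvRep]]
    rw [ih]; simp [pvScan]
  | case5 c c2 r h1 h2 h3 ih =>
    obtain ⟨hc, hc2⟩ := h3; subst hc; subst hc2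
    rw [pvRep_cons_ne '`' 'n' '\n' '\\' _ (by simp)]
    rw [pvRep_cons_ne '`' 'n' '\n' '"' _ (by simp)]
    rw [pvRep_cons_ne '\\' 'n' '\n' '\\' _ (by simp)]
    rw [pvRep_cons_ne '\\' 'n' '\n' '"' _ (by simp)]
    rw [pvRep_cons_ne '\\' 't' '\t' '\\' _ (by simp)]
    rw [pvRep_cons_ne '\\' 't' '\t' '"' _ (by simp)]
    rw [ih]; simp [pvScan]
  | case6 c c2 r h1 h2 h3 ih =>
    have e1 : pvRep '`' 'n' '\n' (c :: c2 :: r) = c :: pvRep '`' 'n' '\n' (c2 :: r) := by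
      apply pvRep_cons_ne; simp only [List.head?_cons, Option.some.injEq]; tauto
    rw [e1]
    have e2 : pvRep '\\' 'n' '\n' (c :: pvRep '`' 'n' '\n' (c2 :: r))
        = c :: pvRep '\\' 'n' '\n' (pvRep '`' 'n' '\n' (c2 :: r)) := by
      apply pvRep_cons_ne
      rcases pvRep_head '`' 'n' '\n' (c2 :: r) with hh | hh <;> rw [hh]
      · simp
      · simp only [List.head?_cons, Option.some.injEq]; tauto
    rw [e2]
    have e3 : pvRep '\\' 't' '\t' (c :: pvRep '\\' 'n' '\n' (pvRep '`' 'n' '\n' (c2 :: r)))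
        = c :: pvRep '\\' 't' '\t' (pvRep '\\' 'n' '\n' (pvRep '`' 'n' '\n' (c2 :: r))) := by
      apply pvRep_cons_ne
      rcases pvRep_head '\\' 'n' '\n' (pvRep '`' 'n' '\n' (c2 :: r)) with hh | hh <;> rw [hh]
      · simp
      · rcases pvRep_head '`' 'n' '\n' (c2 :: r) with hg | hg <;> rw [hg]
        · simp
        · simp only [List.head?_cons, Option.some.injEq]; tauto
    rw [e3, ih]
    rw [pvScan_cons_safe c (c2 :: r) (by simpa using h1) (by simpa using h2) (by simpa using h3)]

-- pvSegs unfolding lemmas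
theorem pvSegs_toggle (prev : Option Char) (c : Char) (r : List Char)
    (h : c = '"' ∧ prev ≠ some '\\') :
    pvSegs prev (c :: r) = ([], (pvSegs (some c) r).1 :: (pvSegs (some c) r).2) := by
  simp [pvSegs, h]

theorem pvSegs_keep (prev : Option Char) (c : Char) (r : List Char)
    (h : ¬(c = '"' ∧ prev ≠ some '\\')) :
    pvSegs prev (c :: r) = (c :: (pvSegs (some c) r).1, (pvSegs (some c) r).2) := by
  simp [pvSegs, h]

-- head of the current segment is the head of the remaining text (or the segment is empty)
theorem pvSegs_head (p : Option Char) (l : List Char) :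
    (pvSegs p l).1.head? = none ∨ (pvSegs p l).1.head? = l.head? := by
  match l with
  | [] => left; rfl
  | c :: r =>
    by_cases h : c = '"' ∧ p ≠ some '\\'
    · left; simp [pvSegs, h]
    · right; simp [pvSegs, h]

theorem pvIlv_in_eq (proc : List Char → List Char) (pre h2 : List Char)
    (t : List (List Char)) :
    pvIlv proc true (pre ++ h2) t = pre ++ pvIlv proc true h2 t := by
  match t with
  | [] => simp [pvIlv]
  | x :: t' => simp [pvIlv]

theorem pvIlv_out_eq (pre h1 h2 : List Char) (t : List (List Char))
    (h : pvScan h1 = pre ++ pvScan h2) :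
    pvIlv pvScan false h1 t = pre ++ pvIlv pvScan false h2 t := by
  match t with
  | [] => simpa [pvIlv] using h
  | x :: t' => simp [pvIlv, h]

-- pvRef = segments interleaved with pvScan
theorem pvRef_eq_segs : ∀ (prev : Option Char) (inside : Bool) (s : List Char),
    pvRef prev inside s = pvIlv pvScan inside (pvSegs prev s).1 (pvSegs prev s).2 := by
  intro prev inside s
  induction prev, inside, s using pvRef.induct with
  | case1 prev inside => simp [pvSegs, pvIlv, pvScan, pvRef]
  | case2 prev inside c =>
    by_cases h : c = '"' ∧ prev ≠ some '\\'
    · rw [pvSegs_toggle _ _ _ h]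
      simp [pvSegs, pvIlv, pvScan, pvRef, h.1]
    · rw [pvSegs_keep _ _ _ h]
      simp [pvSegs, pvIlv, pvScan, pvRef]
  | case3 prev inside c2 r ih =>
    by_cases hp : prev = some '\\'
    · rw [if_pos hp] at ih
      rw [pvSegs_keep _ _ _ (by simp [hp])]
      simp only [pvRef, if_pos hp]
      rw [ih]
      cases inside with
      | true => exact (pvIlv_in_eq pvScan ['"'] _ _).symm
      | false =>
        exact (pvIlv_out_eq ['"'] _ _ _
          (pvScan_cons_safe '"' _ (by simp) (by simp) (by simp))).symm
    · rw [if_neg hp] at ih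
      rw [pvSegs_toggle _ _ _ ⟨rfl, hp⟩]
      simp only [pvRef, if_neg hp]
      rw [ih]
      cases inside <;> simp [pvIlv, pvScan]
  | case4 prev c c2 r hq ih =>
    rw [pvSegs_keep _ _ _ (by simp [hq])]
    simp only [pvRef, if_neg hq]
    rw [ih]
    exact (pvIlv_in_eq pvScan [c] _ _).symm
  | case5 prev inside c c2 r hq hin hpat ih =>
    obtain ⟨hc, hc2⟩ := hpat; subst hc2
    simp only [Bool.not_eq_true] at hin; subst hin
    rw [pvSegs_keep _ _ _ (by simp [hq])]
    rw [pvSegs_keep (some c) 'n' r (by simp)]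
    rcases hc with hc | hc <;> subst hc <;>
      · rw [show pvRef prev false (_ :: 'n' :: r) = '\n' :: pvRef (some 'n') false r from by
          simp [pvRef]]
        rw [ih]
        refine (pvIlv_out_eq ['\n'] _ _ _ ?_).symm
        simp [pvScan]
  | case6 prev inside c c2 r hq hin hp1 hpat ih =>
    obtain ⟨hc, hc2⟩ := hpat; subst hc; subst hc2
    simp only [Bool.not_eq_true] at hin; subst hin
    rw [pvSegs_keep _ _ _ (by simp [hq])]
    rw [pvSegs_keep (some '\\') 't' r (by simp)]
    rw [show pvRef prev false ('\\' :: 't' :: r) = '\t' :: pvRef (some 't') false r from by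
      simp [pvRef]]
    rw [ih]
    refine (pvIlv_out_eq ['\t'] _ _ _ ?_).symm
    simp [pvScan]
  | case7 prev inside c c2 r hq hin hp1 hp2 hpat ih =>
    obtain ⟨hc, hc2⟩ := hpat; subst hc; subst hc2
    simp only [Bool.not_eq_true] at hin; subst hin
    rw [pvSegs_keep _ _ _ (by simp [hq])]
    rw [pvSegs_keep (some '\\') '"' r (by simp)]
    rw [show pvRef prev false ('\\' :: '"' :: r) = '\\' :: '"' :: pvRef (some '"') false r from by
      simp [pvRef]]
    rw [ih]
    refine (pvIlv_out_eq ['\\', '"'] _ _ _ ?_).symm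
    simp [pvScan]
  | case8 prev inside c c2 r hq hin hp1 hp2 hp3 ih =>
    simp only [Bool.not_eq_true] at hin; subst hin
    rw [pvSegs_keep _ _ _ (by simp [hq])]
    rw [show pvRef prev false (c :: c2 :: r) = c :: pvRef (some c) false (c2 :: r) from by
      simp only [pvRef, if_neg hq, Bool.false_eq_true, if_false, if_neg hp1, if_neg hp2, if_neg hp3]]
    rw [ih]
    have hh := pvSegs_head (some c) (c2 :: r)
    simp only [List.head?_cons] at hh
    refine (pvIlv_out_eq [c] _ _ _ ?_).symm
    rw [pvScan_cons_safe c (pvSegs (some c) (c2 :: r)).1]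
    · simp
    · rcases hh with hh | hh <;> rw [hh]
      · simp
      · simp only [Option.some.injEq]; tauto
    · rcases hh with hh | hh <;> rw [hh]
      · simp
      · simp only [Option.some.injEq]; tauto
    · rcases hh with hh | hh <;> rw [hh]
      · simp
      · simp only [Option.some.injEq]; tauto

-- the carried previous character of A's loop
theorem pvPrev_succ (code : List Char) (i : Nat) :
    (if i + 1 = 0 then none else some (code.getD (i + 1 - 1) ' ')) = some (code.getD i ' ') := by
  simp

theorem pvPrev_succ2 (code : List Char) (i : Nat) :
    (if i + 2 = 0 then none else some (code.getD (i + 2 - 1) ' ')) = some (code.getD (i + 1) ' ') := by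
  simp

-- A's indexed loop = pvRef
theorem pvA_eq_ref : ∀ (code : List Char) (i : Nat) (b : Bool) (acc : List Char),
    clean_code_loop code i b acc
      = acc ++ pvRef (if i = 0 then none else some (code.getD (i - 1) ' ')) b (code.drop i) := by
  intro code i b acc
  induction i, b, acc using clean_code_loop.induct (code := code) with
  | case1 i b acc hlt hq hesc ih =>
    -- quote, escaped (0 < i and code[i-1] = '\\')
    rw [clean_code_loop]
    rw [dif_pos hlt, if_pos hq, if_pos hesc, ih, pvPrev_succ, hq]
    rw [List.drop_eq_getElem_cons hlt, ← List.getD_eq_getElem code ' ' hlt, hq]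
    have hprev : (if i = 0 then none else some (code.getD (i - 1) ' ')) = some '\\' := by
      rw [if_neg (by omega)]; exact congrArg some hesc.2
    rw [hprev]
    rcases hd : code.drop (i + 1) with _ | ⟨c2, r⟩ <;> simp [pvRef]
  | case2 i b acc hlt hq hesc ih =>
    -- quote, toggling
    rw [clean_code_loop]
    rw [dif_pos hlt, if_pos hq, if_neg hesc, ih, pvPrev_succ, hq]
    rw [List.drop_eq_getElem_cons hlt, ← List.getD_eq_getElem code ' ' hlt, hq]
    have hprev : ¬ (if i = 0 then none else some (code.getD (i - 1) ' ')) = some '\\' := by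
      by_cases h0 : i = 0
      · simp [h0]
      · rw [if_neg h0]
        simp only [Option.some.injEq]
        intro hc; exact hesc ⟨by omega, hc⟩
    rcases hd : code.drop (i + 1) with _ | ⟨c2, r⟩ <;>
      · simp only [pvRef, if_neg hprev]
        simp
  | case3 i acc hlt hq ih =>
    -- inside a string
    rw [clean_code_loop]
    rw [dif_pos hlt, if_neg hq, if_pos rfl, ih, pvPrev_succ]
    rw [List.drop_eq_getElem_cons hlt, ← List.getD_eq_getElem code ' ' hlt]
    rcases hd : code.drop (i + 1) with _ | ⟨c2, r⟩ <;>
      · simp only [pvRef, if_neg hq]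
        simp
  | case4 i b acc hlt hq hin hbt ih =>
    -- '`' followed by 'n'
    obtain ⟨hbt1, hbt2, hbt3⟩ := hbt
    rw [clean_code_loop]
    rw [dif_pos hlt, if_neg hq, if_neg hin, if_pos ⟨hbt1, hbt2, hbt3⟩, ih, pvPrev_succ2, hbt3]
    rw [List.drop_eq_getElem_cons hlt, ← List.getD_eq_getElem code ' ' hlt]
    rw [List.drop_eq_getElem_cons hbt2, ← List.getD_eq_getElem code ' ' hbt2, hbt3]
    rw [show i + 1 + 1 = i + 2 from rfl]
    simp only [Bool.not_eq_true] at hin; subst hin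
    simp only [pvRef, if_neg hq, Bool.false_eq_true, if_false]
    rw [if_pos ⟨Or.inl hbt1, trivial⟩]
    simp
  | case5 i b acc hlt hq hin hbt hbn ih =>
    -- '\\' followed by 'n'
    obtain ⟨hb1, hb2, hb3⟩ := hbn
    rw [clean_code_loop]
    rw [dif_pos hlt, if_neg hq, if_neg hin, if_neg hbt, if_pos ⟨hb1, hb2, hb3⟩, ih, pvPrev_succ2, hb3]
    rw [List.drop_eq_getElem_cons hlt, ← List.getD_eq_getElem code ' ' hlt]
    rw [List.drop_eq_getElem_cons hb2, ← List.getD_eq_getElem code ' ' hb2, hb3]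
    rw [show i + 1 + 1 = i + 2 from rfl]
    simp only [Bool.not_eq_true] at hin; subst hin
    simp only [pvRef, if_neg hq, Bool.false_eq_true, if_false]
    rw [if_pos ⟨Or.inr hb1, trivial⟩]
    simp
  | case6 i b acc hlt hq hin hbt hbn hbtab ih =>
    -- '\\' followed by 't'
    obtain ⟨hb1, hb2, hb3⟩ := hbtab
    rw [clean_code_loop]
    rw [dif_pos hlt, if_neg hq, if_neg hin, if_neg hbt, if_neg hbn,
      if_pos ⟨hb1, hb2, hb3⟩, ih, pvPrev_succ2, hb3]
    rw [List.drop_eq_getElem_cons hlt, ← List.getD_eq_getElem code ' ' hlt]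
    rw [List.drop_eq_getElem_cons hb2, ← List.getD_eq_getElem code ' ' hb2, hb3]
    rw [show i + 1 + 1 = i + 2 from rfl]
    simp only [Bool.not_eq_true] at hin; subst hin
    have hp1 : ¬((code.getD i ' ' = '`' ∨ code.getD i ' ' = '\\') ∧ ('t' : Char) = 'n') := by simp
    simp only [pvRef, if_neg hq, Bool.false_eq_true, if_false]
    rw [if_neg hp1, if_pos ⟨hb1, trivial⟩]
    simp
  | case7 i b acc hlt hq hin hbt hbn hbtab hbq ih =>
    -- '\\' followed by '"'
    obtain ⟨hb1, hb2, hb3⟩ := hbq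
    rw [clean_code_loop]
    rw [dif_pos hlt, if_neg hq, if_neg hin, if_neg hbt, if_neg hbn, if_neg hbtab,
      if_pos ⟨hb1, hb2, hb3⟩, ih, pvPrev_succ2, hb3]
    rw [List.drop_eq_getElem_cons hlt, ← List.getD_eq_getElem code ' ' hlt]
    rw [List.drop_eq_getElem_cons hb2, ← List.getD_eq_getElem code ' ' hb2, hb3]
    rw [show i + 1 + 1 = i + 2 from rfl]
    simp only [Bool.not_eq_true] at hin; subst hin
    have hp1 : ¬((code.getD i ' ' = '`' ∨ code.getD i ' ' = '\\') ∧ ('"' : Char) = 'n') := by simp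
    have hp2 : ¬(code.getD i ' ' = '\\' ∧ ('"' : Char) = 't') := by simp
    simp only [pvRef, if_neg hq, Bool.false_eq_true, if_false]
    rw [if_neg hp1, if_neg hp2, if_pos ⟨hb1, trivial⟩]
    simp
  | case8 i b acc hlt hq hin hbt hbn hbtab hbq ih =>
    -- plain character outside a string
    rw [clean_code_loop]
    rw [dif_pos hlt, if_neg hq, if_neg hin, if_neg hbt, if_neg hbn, if_neg hbtab, if_neg hbq,
      ih, pvPrev_succ]
    rw [List.drop_eq_getElem_cons hlt, ← List.getD_eq_getElem code ' ' hlt]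
    simp only [Bool.not_eq_true] at hin; subst hin
    rcases hd : code.drop (i + 1) with _ | ⟨c2, r⟩
    · simp [pvRef]
    · have hlen : i + 1 < code.length := by
        by_contra hc
        rw [List.drop_eq_nil_of_le (by omega)] at hd
        exact (List.cons_ne_nil _ _) hd.symm
      have hc2 : c2 = code.getD (i + 1) ' ' := by
        have h := List.drop_eq_getElem_cons (l := code) hlen
        rw [hd, ← List.getD_eq_getElem code ' ' hlen] at h
        exact (List.cons_eq_cons.mp h).1
      have h1 : ¬((code.getD i ' ' = '`' ∨ code.getD i ' ' = '\\') ∧ c2 = 'n') := by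
        rw [hc2]; rintro ⟨hl | hl, hr⟩
        · exact hbt ⟨hl, hlen, hr⟩
        · exact hbn ⟨hl, hlen, hr⟩
      have h2 : ¬(code.getD i ' ' = '\\' ∧ c2 = 't') := by
        rw [hc2]; rintro ⟨hl, hr⟩; exact hbtab ⟨hl, hlen, hr⟩
      have h3 : ¬(code.getD i ' ' = '\\' ∧ c2 = '"') := by
        rw [hc2]; rintro ⟨hl, hr⟩; exact hbq ⟨hl, hlen, hr⟩
      simp only [pvRef, if_neg hq, Bool.false_eq_true, if_false, if_neg h1, if_neg h2, if_neg h3]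
      simp
  | case9 i b acc hge =>
    rw [clean_code_loop]
    rw [dif_neg hge]
    rw [List.drop_eq_nil_of_le (by omega)]
    simp [pvRef]

-- finishing step of B: join pieces plus the final segment
def pvFinishB (st : List (List Char) × List Char × Bool × Option Char) : List Char :=
  (st.1 ++ [if st.2.2.1 then st.2.1 else pvExpand st.2.1]).flatten

-- B's fold = segments interleaved with pvExpand
theorem pvB_eq_segs : ∀ (s : List Char) (pieces : List (List Char)) (seg : List Char)
    (inside : Bool) (prev : Option Char),
    pvFinishB (s.foldl pvStepB (pieces, seg, inside, prev))
      = pieces.flatten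
        ++ pvIlv pvExpand inside (seg ++ (pvSegs prev s).1) (pvSegs prev s).2 := by
  intro s
  induction s with
  | nil =>
    intro pieces seg inside prev
    simp [pvSegs, pvIlv, pvFinishB]
  | cons c r ih =>
    intro pieces seg inside prev
    by_cases h : c = '"' ∧ prev ≠ some '\\'
    · simp only [List.foldl_cons, pvStepB, if_pos h]
      rw [ih]
      rw [pvSegs_toggle _ _ _ h]
      simp [pvIlv]
    · simp only [List.foldl_cons, pvStepB, if_neg h]
      rw [ih]
      rw [pvSegs_keep _ _ _ h]
      simp

theorem pvIlv_congr (p q : List Char → List Char) (h : ∀ x, p x = q x) :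
    ∀ (t : List (List Char)) (inside : Bool) (hd : List Char),
      pvIlv p inside hd t = pvIlv q inside hd t := by
  intro t
  induction t with
  | nil => intro inside hd; simp [pvIlv, h]
  | cons h2 t ih => intro inside hd; simp [pvIlv, h, ih]

-- ===== VERDICT (by name: the statement is the Claim_ definition above) =====
theorem clean_code_spec : Claim_equal_clean_code := by
  intro code _
  unfold Spec_clean_code clean_code clean_code_alt
  rw [pvA_eq_ref code.toList 0 false []]
  have hB := pvB_eq_segs code.toList [] [] false none
  rcases hfold : List.foldl pvStepB ([], [], false, none) code.toList with ⟨ps, sg, ins, pv⟩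
  rw [hfold] at hB
  simp only [pvFinishB, List.flatten_nil, List.nil_append] at hB
  simp only [hB, List.drop_zero]
  rw [pvRef_eq_segs]
  rw [pvIlv_congr pvScan pvExpand (fun x => (pvScan_eq_expand x).symm)]
  simp
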